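-- pv_equiv track=rewrite | github.com/ahmadexe/Competitive-Programming | coolname.py | solve
-- ===== SOURCE A (Python) =====
-- def solve(string):
--     power = 0
--     sorted_string = "".join(sorted(string))
--     for i in range(len(string)):
--         val = ord(sorted_string[i]) - 97
--         val += 1
--         power += (val * (i+1))
--     return power
-- ===== SOURCE B (Python) =====
-- def solve(string):
--     counts = {}
--     for c in string:
--         counts[c] = counts.get(c, 0) + 1
--     power = 0
--     pos = 0
--     for code in range(128):
--         k = counts.get(chr(code), 0)
--         power += (code - 96) * (k * (2 * pos + k + 1) // 2)
--         pos += k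
--     return power
-- ===== Notes on version B (the rewrite author's own statement) =====
-- stated objective: faster
-- what changed: replaces sorting the string and a per-character weighted loop by a single counting pass plus a 128-bucket sweep that adds each character class's contribution with a Gauss closed form
import Mathlib
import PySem

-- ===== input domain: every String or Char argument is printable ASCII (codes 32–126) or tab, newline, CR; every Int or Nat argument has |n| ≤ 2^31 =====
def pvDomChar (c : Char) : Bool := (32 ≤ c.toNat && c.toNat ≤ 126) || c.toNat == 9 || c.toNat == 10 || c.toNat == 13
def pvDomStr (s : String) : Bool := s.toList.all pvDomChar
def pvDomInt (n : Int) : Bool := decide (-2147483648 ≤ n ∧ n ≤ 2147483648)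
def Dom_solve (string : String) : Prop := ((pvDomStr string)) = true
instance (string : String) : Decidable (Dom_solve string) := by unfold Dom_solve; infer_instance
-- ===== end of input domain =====

-- B replaces sorting plus a per-character weighted loop by one counting pass and a 128-bucket
-- sweep using a Gauss closed form per character class (objective: faster).

-- ===== PORT A =====
-- sorted(string) is kept as the sorted list of characters; "".join only concatenates them and
-- indexing the joined string reads exactly those characters, so the port indexes the list.
def solve (string : String) : Int :=
  let sorted_string : List Char := PySem.List.sorted string.toList (fun c => c) false
  (PySem.List.pyRange 0 (PySem.Str.len string) 1).foldl
    (fun power i =>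
      let val : Int := ((PySem.List.pyGetD sorted_string i ' ').toNat : Int) - 97
      let val := val + 1
      power + val * (i + 1)) 0

-- ===== PORT B =====
def solve_alt (string : String) : Int :=
  let counts : PySem.Dict Char Int :=
    string.toList.foldl (fun d c => PySem.Dict.insert d c (PySem.Dict.getD d c 0 + 1))
      PySem.Dict.empty
  let r :=
    (PySem.List.pyRange 0 128 1).foldl
      (fun (s : Int × Int) code =>
        let k := PySem.Dict.getD counts (Char.ofNat code.toNat) 0
        (s.1 + (code - 96) * PySem.Int.floordiv (k * (2 * s.2 + k + 1)) 2, s.2 + k))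
      (0, 0)
  r.1

-- ===== PRECONDITION & SPEC =====
def Spec_solve (string : String) (out : Int) : Prop := out = solve_alt string
instance (string : String) (out : Int) : Decidable (Spec_solve string out) := by unfold Spec_solve; infer_instance

-- ===== CLAIM (what is proved, stated in full; the proofs are below) =====
def Claim_equal_solve : Prop := ∀ (string : String), Dom_solve string → Spec_solve string (solve string)

-- ===== LEMMAS AND PROOFS =====

/-- The weighted sum both programs compute: positions p, p+1, … times (code − 96). -/
def wsum : List Char → Int → Int
  | [], _ => 0
  | c :: t, p => ((c.toNat : Int) - 96) * p + wsum t (p + 1)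

theorem wsum_append (l1 l2 : List Char) (p : Int) :
    wsum (l1 ++ l2) p = wsum l1 p + wsum l2 (p + l1.length) := by
  induction l1 generalizing p with
  | nil => simp [wsum]
  | cons c t ih =>
      simp only [List.cons_append, wsum, ih, List.length_cons]
      push_cast
      ring

theorem two_mul_wsum_replicate (m : Nat) (c : Char) :
    ∀ p : Int, 2 * wsum (List.replicate m c) p
      = ((c.toNat : Int) - 96) * (m * (2 * p + m - 1)) := by
  induction m with
  | zero => intro p; simp [wsum]
  | succ n ih =>
      intro p
      rw [List.replicate_succ]
      simp only [wsum]
      rw [mul_add, ih (p + 1)]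
      push_cast
      ring

/-- The closed-form bucket contribution of B equals the weighted sum over that bucket. -/
theorem group_eq (c : Char) (m : Nat) (pos : Int) :
    ((c.toNat : Int) - 96) * PySem.Int.floordiv ((m : Int) * (2 * pos + (m : Int) + 1)) 2
      = wsum (List.replicate m c) (pos + 1) := by
  obtain ⟨u, hu⟩ : Even ((m : Int) * ((m : Int) + 1)) := Int.even_mul_succ_self _
  have ht : (m : Int) * (2 * pos + (m : Int) + 1) = 2 * ((m : Int) * pos + u) := by
    rw [show (m : Int) * (2 * pos + (m : Int) + 1)
        = 2 * ((m : Int) * pos) + (m : Int) * ((m : Int) + 1) from by ring, hu]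
    ring
  rw [ht, PySem.Int.floordiv_eq_ediv_of_pos (by norm_num),
    Int.mul_ediv_cancel_left _ (by norm_num)]
  have h2 := two_mul_wsum_replicate m c (pos + 1)
  have hr : (m : Int) * (2 * (pos + 1) + (m : Int) - 1) = 2 * ((m : Int) * pos + u) := by
    rw [← ht]; ring
  rw [hr] at h2
  linarith

/-- B's sweep over a list of codes computes the weighted sum of the bucket expansion. -/
theorem foldB (cnt : Char → Nat) (cs : List Int)
    (hcs : ∀ code ∈ cs, 0 ≤ code ∧ code < 128) (P pos : Int) :
    cs.foldl
      (fun (s : Int × Int) code =>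
        (s.1 + (code - 96) * PySem.Int.floordiv
            (((cnt (Char.ofNat code.toNat) : Int)) *
              (2 * s.2 + ((cnt (Char.ofNat code.toNat) : Int)) + 1)) 2,
          s.2 + ((cnt (Char.ofNat code.toNat) : Int)))) (P, pos)
    = (P + wsum (cs.flatMap
          (fun code => List.replicate (cnt (Char.ofNat code.toNat)) (Char.ofNat code.toNat)))
          (pos + 1),
        pos + ((cs.flatMap
          (fun code => List.replicate (cnt (Char.ofNat code.toNat)) (Char.ofNat code.toNat))).length : Int)) := by
  induction cs generalizing P pos with
  | nil => simp [wsum]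
  | cons code cs ih =>
      obtain ⟨h0, h1⟩ := hcs code (List.mem_cons_self)
      have hvalid : (code.toNat).isValidChar := Or.inl (by omega)
      have htn : (Char.ofNat code.toNat).toNat = code.toNat := by
        rw [Char.toNat_ofNat, if_pos hvalid]
      have hcode : ((Char.ofNat code.toNat).toNat : Int) = code := by
        rw [htn]; exact Int.toNat_of_nonneg h0
      rw [List.foldl_cons, ih (fun k hk => hcs k (List.mem_cons_of_mem _ hk))]
      rw [List.flatMap_cons, wsum_append, List.length_append, List.length_replicate,
        Nat.cast_add]
      have hg : (code - 96) * PySem.Int.floordiv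
            ((cnt (Char.ofNat code.toNat) : Int) *
              (2 * pos + (cnt (Char.ofNat code.toNat) : Int) + 1)) 2
          = wsum (List.replicate (cnt (Char.ofNat code.toNat)) (Char.ofNat code.toNat))
              (pos + 1) := by
        have h := group_eq (Char.ofNat code.toNat) (cnt (Char.ofNat code.toNat)) pos
        rw [hcode] at h
        exact h
      rw [← hg]
      have harg : pos + 1 + ((cnt (Char.ofNat code.toNat) : Nat) : Int)
          = pos + (cnt (Char.ofNat code.toNat) : Int) + 1 := by ring
      rw [harg]
      simp only [Prod.mk.injEq]
      constructor <;> ring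

/-- A's indexed loop from position j computes the weighted sum of the dropped suffix. -/
theorem foldA (l : List Char) (j : Nat) (acc : Int) (hj : j ≤ l.length) :
    (PySem.List.pyRange (j : Int) (l.length : Int) 1).foldl
      (fun power i =>
        power + (((PySem.List.pyGetD l i ' ').toNat : Int) - 97 + 1) * (i + 1)) acc
    = acc + wsum (l.drop j) ((j : Int) + 1) := by
  induction h : l.length - j generalizing j acc with
  | zero =>
      have hjl : j = l.length := by omega
      subst hjl
      rw [PySem.List.pyRange_one_eq_nil (by omega)]
      simp [wsum]
  | succ n ih =>
      have hjl : j < l.length := by omega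
      rw [PySem.List.pyRange_one_cons (by exact_mod_cast hjl), List.foldl_cons]
      have hdrop : l.drop j = l[j] :: l.drop (j + 1) :=
        List.drop_eq_getElem_cons hjl
      have hget : PySem.List.pyGetD l (j : Int) ' ' = l[j] := by
        rw [PySem.List.pyGetD_natCast, List.getD_eq_getElem _ _ hjl]
      have hcast : ((j : Int) + 1) = ((j + 1 : Nat) : Int) := by push_cast; ring
      rw [hget, hcast, ih (j + 1) _ (by omega) (by omega)]
      rw [hdrop]
      simp only [wsum]
      push_cast
      ring

theorem chr_le_chr {k k' : Nat} (hk : k < 55296) (hk' : k' < 55296) (h : k ≤ k') :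
    Char.ofNat k ≤ Char.ofNat k' := by
  apply Char.le_def.mpr
  have h1 : (Char.ofNat k).toNat = k := by rw [Char.toNat_ofNat, if_pos (Or.inl hk)]
  have h2 : (Char.ofNat k').toNat = k' := by rw [Char.toNat_ofNat, if_pos (Or.inl hk')]
  have : (Char.ofNat k).toNat ≤ (Char.ofNat k').toNat := by omega
  exact this

theorem count_flat_nat (cnt : Char → Nat) (ks : List Nat)
    (hks : ∀ k ∈ ks, k < 55296) (hnd : ks.Nodup) (a : Char) :
    (ks.flatMap (fun k => List.replicate (cnt (Char.ofNat k)) (Char.ofNat k))).count a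
      = if a.toNat ∈ ks then cnt a else 0 := by
  induction ks with
  | nil => simp
  | cons k ks ih =>
      have hkv : (Char.ofNat k).toNat = k := by
        rw [Char.toNat_ofNat, if_pos (Or.inl (hks k List.mem_cons_self))]
      rw [List.flatMap_cons, List.count_append,
        ih (fun x hx => hks x (List.mem_cons_of_mem _ hx)) hnd.of_cons]
      by_cases hak : a.toNat = k
      · have hca : Char.ofNat k = a := by
          rw [← hak, Char.ofNat_toNat]
        have hnotmem : k ∉ ks := (List.nodup_cons.mp hnd).1
        simp [hca, hnotmem, hak]
      · have hca : Char.ofNat k ≠ a := fun hcontra => hak (by rw [← hcontra, hkv])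
        have hb : (Char.ofNat k == a) = false := beq_false_of_ne hca
        simp [List.count_replicate, hb, hak]

theorem pairwise_flat_nat (cnt : Char → Nat) (ks : List Nat)
    (hks : ∀ k ∈ ks, k < 55296) (hp : ks.Pairwise (· < ·)) :
    (ks.flatMap (fun k => List.replicate (cnt (Char.ofNat k)) (Char.ofNat k))).Pairwise (· ≤ ·) := by
  induction ks with
  | nil => simp
  | cons k ks ih =>
      rw [List.flatMap_cons]
      apply List.pairwise_append.mpr
      refine ⟨?_, ?_, ?_⟩
      · exact List.pairwise_replicate.mpr (Or.inr le_rfl)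
      · exact ih (fun x hx => hks x (List.mem_cons_of_mem _ hx)) hp.of_cons
      · intro a ha b hb
        obtain ⟨k', hk', hb'⟩ := List.mem_flatMap.mp hb
        have ha' : a = Char.ofNat k := List.eq_of_mem_replicate ha
        have hb'' : b = Char.ofNat k' := List.eq_of_mem_replicate hb'
        subst ha'; subst hb''
        exact chr_le_chr (hks k List.mem_cons_self)
          (hks k' (List.mem_cons_of_mem _ hk'))
          (Nat.le_of_lt ((List.pairwise_cons.mp hp).1 k' hk'))

/-- Counting-sort correctness: the concatenation of the 128 buckets IS sorted(string). -/
theorem sorted_eq_flat (s : List Char) (hdom : ∀ c ∈ s, c.toNat < 128) :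
    PySem.List.sorted s (fun c => c) false
      = (List.range 128).flatMap
          (fun k => List.replicate (s.count (Char.ofNat k)) (Char.ofNat k)) := by
  apply PySem.List.sorted_id_eq_of_perm_of_pairwise
  · rw [List.perm_iff_count]
    intro a
    rw [count_flat_nat (fun c => s.count c) (List.range 128)
      (fun k hk => by have := List.mem_range.mp hk; omega) (List.nodup_range) a]
    by_cases hmem : a.toNat ∈ List.range 128
    · simp [hmem]
    · rw [if_neg hmem]
      have : a ∉ s := fun hin => hmem (List.mem_range.mpr (hdom a hin))
      exact (List.count_eq_zero_of_not_mem this).symm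
  · exact pairwise_flat_nat (fun c => s.count c) (List.range 128)
      (fun k hk => by have := List.mem_range.mp hk; omega) (List.pairwise_lt_range)

theorem flat_int_eq_nat (cnt : Char → Nat) :
    (PySem.List.pyRange 0 128 1).flatMap
        (fun code => List.replicate (cnt (Char.ofNat code.toNat)) (Char.ofNat code.toNat))
      = (List.range 128).flatMap
          (fun k => List.replicate (cnt (Char.ofNat k)) (Char.ofNat k)) := by
  rw [PySem.List.pyRange_one]
  rw [List.flatMap_map]
  simp

-- ===== VERDICT (by name: the statement is the Claim_ definition above) =====
theorem solve_spec : Claim_equal_solve := by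
  intro string hdom
  have hdom' : ∀ c ∈ string.toList, c.toNat < 128 := by
    intro c hc
    have := List.all_eq_true.mp hdom c hc
    simp only [pvDomChar, Bool.or_eq_true, Bool.and_eq_true, decide_eq_true_eq,
      beq_iff_eq] at this
    omega
  show solve string = solve_alt string
  simp only [solve, solve_alt]
  rw [PySem.Dict.foldl_insert_getD_add_one_eq_counter]
  simp only [PySem.Dict.getD_counter]
  rw [foldB (fun c => string.toList.count c) (PySem.List.pyRange 0 128 1)
    (fun code hc => PySem.List.mem_pyRange_one.mp hc) 0 0]
  have hlen : PySem.Str.len string = ((PySem.List.sorted string.toList (fun c => c) false).length : Int) := by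
    rw [PySem.Str.len_eq, PySem.List.length_sorted]
  rw [hlen]
  have := foldA (PySem.List.sorted string.toList (fun c => c) false) 0 0 (by omega)
  simp only [Nat.cast_zero, List.drop_zero] at this
  rw [this]
  rw [sorted_eq_flat string.toList hdom', flat_int_eq_nat (fun c => string.toList.count c)]
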